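-- pv_equiv track=rewrite | github.com/Daxiongmao87/termaite | termaite/commands/safety.py | _contains_command_substitution
-- ===== SOURCE A (Python) =====
-- def _contains_command_substitution(command: str) -> bool:
--     """Check for command substitution patterns."""
--     substitution_patterns = [
--         '$(', '`', '<(', '>(', '${',
--         '\x24\x28', '\x60',  # Hex encoded
--         '%24%28', '%60',     # URL encoded
--         '\\$(', '\\`',       # Escaped (might be double-escaped)
--     ]
--
--     for pattern in substitution_patterns:
--         if pattern in command:
--             return True
--
--     return False
-- ===== SOURCE B (Python) =====
-- def _contains_command_substitution(command: str) -> bool: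
--     """Single left-to-right scan: at each position test whether one of the
--     (deduplicated) substitution markers starts there, instead of one full
--     substring search per pattern."""
--     n = len(command)
--     for i in range(n):
--         c = command[i]
--         if c == '`':
--             return True
--         if c == '$' and i + 1 < n and command[i + 1] in '({':
--             return True
--         if (c == '<' or c == '>') and command[i + 1:i + 2] == '(':
--             return True
--         if c == '%' and (command[i + 1:i + 3] == '60' or command[i + 1:i + 6] == '24%28'):
--             return True
--     return False
-- ===== Notes on version B (the rewrite author's own statement) =====
-- stated objective: alternative
-- what changed: Replaces eleven independent substring searches (one per pattern, with duplicate/escaped entries) by a single left-to-right scan that tests at each position whether one of the seven distinct markers starts there.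
import Mathlib
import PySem

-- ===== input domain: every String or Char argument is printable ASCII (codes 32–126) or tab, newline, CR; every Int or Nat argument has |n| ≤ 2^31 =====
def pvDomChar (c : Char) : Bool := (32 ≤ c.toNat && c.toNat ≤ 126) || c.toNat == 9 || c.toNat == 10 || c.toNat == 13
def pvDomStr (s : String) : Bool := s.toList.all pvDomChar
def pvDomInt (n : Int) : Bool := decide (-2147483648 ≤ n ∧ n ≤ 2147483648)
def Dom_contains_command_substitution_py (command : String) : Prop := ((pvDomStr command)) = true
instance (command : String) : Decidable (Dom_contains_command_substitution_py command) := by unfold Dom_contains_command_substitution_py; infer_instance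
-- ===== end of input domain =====

-- B replaces A's eleven per-pattern substring searches by one left-to-right scan
-- testing at each position whether one of the seven distinct markers starts there
-- (objective: alternative; return values proved equal on the whole domain).


-- ===== PORT A =====
-- the literal pattern list of A, in A's order (incl. the hex/URL/escaped duplicates)
def pvPatternsA : List String :=
  ["$(", "`", "<(", ">(", "${", "\x24\x28", "\x60", "%24%28", "%60", "\\$(", "\\`"]

-- 'for pattern in …: if pattern in command: return True' / 'return False'
def pvLoopA : List String → String → Bool
  | [], _ => false
  | p :: rest, cmd => if PySem.Str.isIn p cmd then true else pvLoopA rest cmd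

def contains_command_substitution_py (command : String) : Bool :=
  pvLoopA pvPatternsA command

-- ===== PORT B =====
-- the per-position test of B's loop body (c = command[i], rest = command[i+1:])
def pvHeadHit (c : Char) (rest : List Char) : Bool :=
  if c = '`' then true
  else if c = '$' ∧ (rest.head? = some '(' ∨ rest.head? = some '{') then true
  else if (c = '<' ∨ c = '>') ∧ rest.head? = some '(' then true
  else if c = '%' ∧ (List.isPrefixOf ['6', '0'] rest ∨ List.isPrefixOf ['2', '4', '%', '2', '8'] rest) then true
  else false

-- 'for i in range(n): …' as a scan over the character list
def pvScanB : List Char → Bool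
  | [] => false
  | c :: rest => if pvHeadHit c rest then true else pvScanB rest

def contains_command_substitution_py_alt (command : String) : Bool :=
  pvScanB command.toList

-- ===== PRECONDITION & SPEC =====
def Spec_contains_command_substitution_py (command : String) (out : Bool) : Prop := out = contains_command_substitution_py_alt command
instance (command : String) (out : Bool) : Decidable (Spec_contains_command_substitution_py command out) := by unfold Spec_contains_command_substitution_py; infer_instance

-- ===== CLAIM (what is proved, stated in full; the proofs are below) =====
def Claim_equal_contains_command_substitution_py : Prop := ∀ (command : String), Dom_contains_command_substitution_py command → Spec_contains_command_substitution_py command (contains_command_substitution_py command)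

-- ===== LEMMAS AND PROOFS =====

-- the seven distinct markers, as an infix condition on the character list
def pvHit7 (l : List Char) : Prop :=
  ['$', '('] <:+: l ∨ ['`'] <:+: l ∨ ['<', '('] <:+: l ∨ ['>', '('] <:+: l ∨
  ['$', '{'] <:+: l ∨ ['%', '6', '0'] <:+: l ∨ ['%', '2', '4', '%', '2', '8'] <:+: l

theorem pv_singleton_prefix_iff (a : Char) (l : List Char) :
    [a] <+: l ↔ l.head? = some a := by
  cases l <;> simp [List.cons_prefix_cons, eq_comm]

theorem pvHeadHit_iff (c : Char) (rest : List Char) :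
    pvHeadHit c rest = true ↔
      (['$', '('] <+: c :: rest ∨ ['`'] <+: c :: rest ∨ ['<', '('] <+: c :: rest ∨
       ['>', '('] <+: c :: rest ∨ ['$', '{'] <+: c :: rest ∨
       ['%', '6', '0'] <+: c :: rest ∨ ['%', '2', '4', '%', '2', '8'] <+: c :: rest) := by
  simp only [pvHeadHit, List.cons_prefix_cons, pv_singleton_prefix_iff,
    List.isPrefixOf_iff_prefix]
  split_ifs <;> simp_all <;> tauto

theorem pvScanB_iff (l : List Char) : pvScanB l = true ↔ pvHit7 l := by
  induction l with
  | nil => simp [pvScanB, pvHit7]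
  | cons c rest ih =>
    simp only [pvScanB]
    constructor
    · intro h
      by_cases hh : pvHeadHit c rest = true
      · rcases (pvHeadHit_iff c rest).mp hh with h7 | h7 | h7 | h7 | h7 | h7 | h7 <;>
          simp [pvHit7, h7.isInfix]
      · simp [hh] at h
        rcases ih.mp h with h7 | h7 | h7 | h7 | h7 | h7 | h7 <;>
          have := List.infix_cons (a := c) h7 <;> tauto
    · intro h
      by_cases hh : pvHeadHit c rest = true
      · simp [hh]
      · simp [hh]
        apply ih.mpr
        have hp := (pvHeadHit_iff c rest).not.mp (by simp [hh])
        push Not at hp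
        obtain ⟨h1, h2, h3, h4, h5, h6, h7⟩ := hp
        rcases h with hq | hq | hq | hq | hq | hq | hq <;>
          rcases (List.infix_cons_iff.mp hq) with hx | hx <;>
          simp [pvHit7] <;> tauto

theorem pvLoopA_cons (p : String) (ps : List String) (c : String) :
    pvLoopA (p :: ps) c = (PySem.Str.isIn p c || pvLoopA ps c) := by
  simp [pvLoopA]

theorem pvLoopA_nil (c : String) : pvLoopA [] c = false := rfl

theorem pvLoopA_iff (cmd : String) :
    contains_command_substitution_py cmd = true ↔ pvHit7 cmd.toList := by
  have t1 : ['\\', '$', '('] <:+: cmd.toList → ['$', '('] <:+: cmd.toList :=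
    fun h => List.IsInfix.trans ⟨['\\'], [], rfl⟩ h
  have t2 : ['\\', '`'] <:+: cmd.toList → ['`'] <:+: cmd.toList :=
    fun h => List.IsInfix.trans ⟨['\\'], [], rfl⟩ h
  have e1 : ("$(" : String).toList = ['$', '('] := rfl
  have e2 : ("`" : String).toList = ['`'] := rfl
  have e3 : ("<(" : String).toList = ['<', '('] := rfl
  have e4 : (">(" : String).toList = ['>', '('] := rfl
  have e5 : ("${" : String).toList = ['$', '{'] := rfl
  have e6 : ("%24%28" : String).toList = ['%', '2', '4', '%', '2', '8'] := rfl
  have e7 : ("%60" : String).toList = ['%', '6', '0'] := rfl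
  have e8 : ("\\$(" : String).toList = ['\\', '$', '('] := rfl
  have e9 : ("\\`" : String).toList = ['\\', '`'] := rfl
  simp only [contains_command_substitution_py, pvPatternsA, pvLoopA_cons, pvLoopA_nil,
    Bool.or_eq_true, PySem.Str.isIn_iff_infix, pvHit7, e1, e2, e3, e4, e5, e6, e7, e8, e9,
    Bool.false_eq_true, or_false]
  constructor
  · rintro (h | h | h | h | h | h | h | h | h | h | h) <;> tauto
  · intro h; tauto

theorem contains_command_substitution_py_spec : Claim_equal_contains_command_substitution_py := by
  intro command _
  unfold Spec_contains_command_substitution_py contains_command_substitution_py_alt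
  rw [Bool.eq_iff_iff, pvLoopA_iff, pvScanB_iff]
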